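-- pv_equiv track=rewrite | github.com/prakashpgh/worldrunsoncode | python/basics/arrays/closest_to_zero.py | nearest_to_zero
-- ===== SOURCE A (Python) =====
-- def nearest_to_zero(nums: list[int]):
--     n = len(nums)
--     nearest = nums[0]
--     for i in range(n):
--         if(abs(nums[i]) < abs(nearest)):
--             nearest = nums[i]
--     if(nearest < 0 and (abs(nearest) in nums)):
--         nearest = -nearest
--     return nearest
-- ===== SOURCE B (Python) =====
-- def nearest_to_zero(nums: list[int]):
--     # sort-then-pick: key orders by |x| first, then positive before negative
--     return sorted(nums, key=lambda x: 2 * abs(x) + (x < 0))[0]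
-- ===== Notes on version B (the rewrite author's own statement) =====
-- stated objective: simpler
-- what changed: Replaces the min-tracking loop plus a membership-based sign fixup with a single stable sort keyed by 2*abs(x)+(x<0) (abs first, positive preferred on ties) and taking the first element.
import Mathlib
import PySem

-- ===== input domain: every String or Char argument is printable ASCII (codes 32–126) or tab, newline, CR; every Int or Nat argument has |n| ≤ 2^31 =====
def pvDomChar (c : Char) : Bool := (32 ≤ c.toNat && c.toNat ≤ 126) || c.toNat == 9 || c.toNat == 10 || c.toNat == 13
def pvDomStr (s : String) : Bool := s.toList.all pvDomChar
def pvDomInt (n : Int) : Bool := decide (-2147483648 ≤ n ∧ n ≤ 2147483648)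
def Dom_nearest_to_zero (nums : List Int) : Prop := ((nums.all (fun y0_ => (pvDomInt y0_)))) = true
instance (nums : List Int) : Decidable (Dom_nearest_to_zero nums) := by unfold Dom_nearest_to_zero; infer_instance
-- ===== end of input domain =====

-- B replaces A's min-tracking loop plus membership sign-fixup by one stable sort
-- keyed by 2*|x| + (x<0) and taking the first element (objective: simpler).

-- ===== PORT A =====
def nearest_to_zero (nums : List Int) : Int :=
  let n : Int := (nums.length : Int)
  let nearest0 : Int := PySem.List.pyGetD nums 0 0
  let nearest : Int := (PySem.List.pyRange 0 n 1).foldl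
    (fun nearest i =>
      if |PySem.List.pyGetD nums i 0| < |nearest| then PySem.List.pyGetD nums i 0 else nearest)
    nearest0
  if nearest < 0 ∧ |nearest| ∈ nums then -nearest else nearest

-- ===== PORT B =====
def nearest_to_zero_alt (nums : List Int) : Int :=
  PySem.List.pyGetD
    (PySem.List.sorted nums (fun x => 2 * |x| + (if x < 0 then 1 else 0)) false) 0 0

-- ===== PRECONDITION & SPEC =====
-- Pre_ excludes only the empty list, on which Python A raises IndexError (nums[0]).
def Pre_nearest_to_zero (nums : List Int) : Prop := nums ≠ []
instance (nums : List Int) : Decidable (Pre_nearest_to_zero nums) := by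
  unfold Pre_nearest_to_zero; infer_instance
def pvWitness_nearest_to_zero : List Int := ([-2, 3, 2, -1])

def Spec_nearest_to_zero (nums : List Int) (out : Int) : Prop := out = nearest_to_zero_alt nums
instance (nums : List Int) (out : Int) : Decidable (Spec_nearest_to_zero nums out) := by
  unfold Spec_nearest_to_zero; infer_instance

-- ===== CLAIM (what is proved, stated in full; the proofs are below) =====
def Claim_equal_nearest_to_zero : Prop := ∀ (nums : List Int), Dom_nearest_to_zero nums → Pre_nearest_to_zero nums → Spec_nearest_to_zero nums (nearest_to_zero nums)

-- ===== LEMMAS AND PROOFS =====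

-- The property characterising the answer: a member of nums of minimal absolute
-- value whose negation is not in nums when it is negative.
def pvGood (nums : List Int) (r : Int) : Prop :=
  r ∈ nums ∧ (∀ y ∈ nums, |r| ≤ |y|) ∧ (r < 0 → -r ∉ nums)

theorem pvGood_unique (nums : List Int) (r₁ r₂ : Int)
    (h₁ : pvGood nums r₁) (h₂ : pvGood nums r₂) : r₁ = r₂ := by
  obtain ⟨m₁, min₁, s₁⟩ := h₁
  obtain ⟨m₂, min₂, s₂⟩ := h₂
  have habs : |r₁| = |r₂| := le_antisymm (min₁ _ m₂) (min₂ _ m₁)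
  rcases abs_eq_abs.mp habs with h | h
  · exact h
  · by_cases hn : r₁ < 0
    · have h2 : -r₁ = r₂ := by omega
      exact absurd (h2 ▸ m₂) (s₁ hn)
    · by_cases hn2 : r₂ < 0
      · have h2 : -r₂ = r₁ := by omega
        exact absurd (h2 ▸ m₁) (s₂ hn2)
      · omega

-- A's running-minimum fold: result is the accumulator or a list element, and its
-- absolute value is ≤ every |y| seen (including the accumulator).
theorem pvFoldA (l : List Int) (acc : Int) :
    ((l.foldl (fun a x => if |x| < |a| then x else a) acc) = acc ∨
     (l.foldl (fun a x => if |x| < |a| then x else a) acc) ∈ l) ∧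
    |l.foldl (fun a x => if |x| < |a| then x else a) acc| ≤ |acc| ∧
    (∀ y ∈ l, |l.foldl (fun a x => if |x| < |a| then x else a) acc| ≤ |y|) := by
  induction l generalizing acc with
  | nil => simp
  | cons x t ih =>
    simp only [List.foldl_cons]
    by_cases h : |x| < |acc|
    · obtain ⟨mem, le, all⟩ := ih x
      rw [if_pos h]
      refine ⟨Or.inr ?_, le.trans h.le, ?_⟩
      · rcases mem with h' | h' <;> simp [h']
      · intro y hy
        rcases List.mem_cons.mp hy with rfl | hy
        · exact le
        · exact all y hy
    · obtain ⟨mem, le, all⟩ := ih acc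
      rw [if_neg h]
      refine ⟨?_, le, ?_⟩
      · rcases mem with h' | h' <;> simp [h']
      · intro y hy
        rcases List.mem_cons.mp hy with rfl | hy
        · exact le.trans (le_of_not_gt h)
        · exact all y hy

theorem pvA_good (nums : List Int) (h : nums ≠ []) : pvGood nums (nearest_to_zero nums) := by
  obtain ⟨x, t, rfl⟩ := List.exists_cons_of_ne_nil h
  unfold nearest_to_zero
  simp only [PySem.List.pyGetD_zero_cons]
  rw [PySem.List.foldl_pyRange_zero_pyGetD' (x :: t) 0
    (fun a v => if |v| < |a| then v else a) x]
  set r := (x :: t).foldl (fun a v => if |v| < |a| then v else a) x with hr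
  obtain ⟨mem, -, all⟩ := pvFoldA (x :: t) x
  have hrmem : r ∈ x :: t := by
    rcases mem with h' | h'
    · rw [hr, h']; exact List.mem_cons_self
    · rw [hr]; exact h'
  by_cases hc : r < 0 ∧ |r| ∈ x :: t
  · rw [if_pos hc]
    refine ⟨by simpa [abs_of_neg hc.1] using hc.2, ?_, ?_⟩
    · intro y hy
      rw [abs_neg]
      exact all y hy
    · intro hh
      exact absurd hc.1 (by omega)
  · rw [if_neg hc]
    refine ⟨hrmem, all, ?_⟩
    intro hneg hmem
    exact hc ⟨hneg, by simpa [abs_of_neg hneg] using hmem⟩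

theorem pvB_good (nums : List Int) (h : nums ≠ []) :
    pvGood nums (nearest_to_zero_alt nums) := by
  unfold nearest_to_zero_alt
  set key : Int → Int := fun x => 2 * |x| + (if x < 0 then 1 else 0) with hkey
  have hnil : PySem.List.sorted nums key false ≠ [] := by
    intro hh; exact h ((PySem.List.sorted_eq_nil_iff nums key false).mp hh)
  obtain ⟨m, tl, hs⟩ := List.exists_cons_of_ne_nil hnil
  have hmin : ∀ y ∈ nums, key m ≤ key y := PySem.List.key_head_sorted_le nums key hs
  have hmem : m ∈ nums := by
    have : m ∈ PySem.List.sorted nums key false := by simp [hs]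
    exact (PySem.List.mem_sorted nums key false m).mp this
  rw [hs]
  simp only [PySem.List.pyGetD_zero_cons]
  refine ⟨hmem, ?_, ?_⟩
  · intro y hy
    have := hmin y hy
    simp only [hkey] at this
    split_ifs at this <;> omega
  · intro hneg hmemneg
    have := hmin (-m) hmemneg
    simp only [hkey] at this
    have h1 : ¬ (-m < 0) := by omega
    rw [if_pos hneg, if_neg h1, abs_neg] at this
    omega

-- ===== VERDICT (by name: the statement is the Claim_ definition above) =====
theorem nearest_to_zero_spec : Claim_equal_nearest_to_zero := by
  intro nums _ hpre
  unfold Spec_nearest_to_zero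
  exact pvGood_unique nums _ _ (pvA_good nums hpre) (pvB_good nums hpre)
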